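-- pv_equiv track=rewrite | github.com/icsekdk/promptEVAL | experiment/nl2futureltl.py | convert_python_ast_to_ltl
-- ===== SOURCE A (Python) =====
-- def convert_python_ast_to_ltl(python_code):
--     conversions = {
--         "Always(": "G(",
--         "Eventually(": "F(",
--         "Next(": "X(",
--         "Until(": "U(",
--         "And(": "(",
--         "Or(": "(",
--         "Not(": "!(",
--     }
--
--     converted = python_code
--     for py_op, ltl_op in conversions.items():
--         converted = converted.replace(py_op, ltl_op)
--
--     return converted.strip()
-- ===== SOURCE B (Python) =====
-- def convert_python_ast_to_ltl(python_code):
--     # Same seven sequential passes, each done as split-on-key / join-with-replacement,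
--     # applied by recursion over a list of rules instead of a loop over a dict.
--     def apply_all(s, rules):
--         if not rules:
--             return s
--         old, new = rules[0]
--         return apply_all(new.join(s.split(old)), rules[1:])
--
--     rules = [
--         ("Always(", "G("),
--         ("Eventually(", "F("),
--         ("Next(", "X("),
--         ("Until(", "U("),
--         ("And(", "("),
--         ("Or(", "("),
--         ("Not(", "!("),
--     ]
--     return apply_all(python_code, rules).strip()
-- ===== Notes on version B (the rewrite author's own statement) =====
-- stated objective: alternative
-- what changed: Each replacement pass is done by splitting the string on the key and joining the fragments with the LTL operator (new.join(s.split(old))), and the seven passes are applied by recursion over a rule list instead of a for-loop of str.replace over a dict; the sequential passes are kept because earlier replacement outputs can complete occurrences of later keys, which a single simultaneous pass would miss.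
import Mathlib
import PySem

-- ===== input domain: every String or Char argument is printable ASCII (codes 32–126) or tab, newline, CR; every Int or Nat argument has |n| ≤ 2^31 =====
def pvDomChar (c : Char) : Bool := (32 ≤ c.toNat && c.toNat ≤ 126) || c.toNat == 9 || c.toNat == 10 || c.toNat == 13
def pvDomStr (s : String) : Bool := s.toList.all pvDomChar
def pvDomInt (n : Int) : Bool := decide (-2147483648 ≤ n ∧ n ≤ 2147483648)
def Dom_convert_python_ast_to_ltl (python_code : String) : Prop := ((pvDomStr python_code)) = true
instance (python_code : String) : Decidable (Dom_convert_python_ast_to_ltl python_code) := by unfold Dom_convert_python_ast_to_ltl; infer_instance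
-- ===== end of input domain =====

-- B replaces each of A's str.replace passes by split-on-key / join-with-operator and applies
-- the seven passes by recursion over a rule list instead of a for-loop over a dict (alternative
-- decomposition, same cost); the sequential passes are kept because they are semantically essential.


-- ===== PORT A =====
def convert_python_ast_to_ltl (python_code : String) : String :=
  let conversions : PySem.Dict String String :=
    (((((((PySem.Dict.empty.insert "Always(" "G(").insert "Eventually(" "F(").insert
        "Next(" "X(").insert "Until(" "U(").insert "And(" "(").insert "Or(" "(").insert
        "Not(" "!(")
  let converted :=
    conversions.items.foldl (fun conv pq => PySem.Str.replace conv pq.1 pq.2) python_code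
  PySem.Str.strip converted

-- ===== PORT B =====
-- Source B's recursive helper: apply each (old, new) rule as new.join(s.split(old))
def pvApplyAll : String → List (String × String) → String
  | s, [] => s
  | s, (old, new) :: rs =>
      pvApplyAll (PySem.Str.join new ((PySem.Str.split? s old).getD [])) rs

def convert_python_ast_to_ltl_alt (python_code : String) : String :=
  PySem.Str.strip (pvApplyAll python_code
    [("Always(", "G("), ("Eventually(", "F("), ("Next(", "X("), ("Until(", "U("),
     ("And(", "("), ("Or(", "("), ("Not(", "!(")])

-- ===== PRECONDITION & SPEC =====
def Spec_convert_python_ast_to_ltl (python_code : String) (out : String) : Prop := out = convert_python_ast_to_ltl_alt python_code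
instance (python_code : String) (out : String) : Decidable (Spec_convert_python_ast_to_ltl python_code out) := by unfold Spec_convert_python_ast_to_ltl; infer_instance

-- ===== CLAIM (what is proved, stated in full; the proofs are below) =====
def Claim_equal_convert_python_ast_to_ltl : Prop := ∀ (python_code : String), Dom_convert_python_ast_to_ltl python_code → Spec_convert_python_ast_to_ltl python_code (convert_python_ast_to_ltl python_code)

-- ===== LEMMAS AND PROOFS =====

-- Clean recursive form of Python's s.replace(old, new) for nonempty old.
def pvRep (old new : List Char) : List Char → List Char
  | [] => []
  | c :: t =>
      if old.isPrefixOf (c :: t) then new ++ pvRep old new (t.drop (old.length - 1))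
      else c :: pvRep old new t
termination_by l => l.length
decreasing_by
  · simp
  · simp

-- Clean recursive form of Python's s.split(sep) for nonempty sep.
def pvSpl (sep : List Char) : List Char → List (List Char)
  | [] => [[]]
  | c :: t =>
      if sep.isPrefixOf (c :: t) then [] :: pvSpl sep (t.drop (sep.length - 1))
      else
        match pvSpl sep t with
        | [] => [[c]]
        | p :: ps => (c :: p) :: ps
termination_by l => l.length
decreasing_by
  · simp
  · simp

theorem pvSpl_ne_nil (sep : List Char) (l : List Char) : pvSpl sep l ≠ [] := by
  cases l with
  | nil => simp [pvSpl]
  | cons c t =>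
    rw [pvSpl]
    split
    · simp
    · cases pvSpl sep t <;> simp

theorem pvReplace_go_eq (old new : List Char) (hold : old ≠ []) :
    ∀ (fuel : Nat) (l acc : List Char), l.length ≤ fuel →
      PySem.Chars.replace.go old new fuel l acc = acc.reverse ++ pvRep old new l := by
  intro fuel
  induction fuel with
  | zero =>
    intro l acc hl
    have : l = [] := by cases l <;> simp_all
    subst this
    simp [PySem.Chars.replace.go, pvRep]
  | succ n ih =>
    intro l acc hl
    cases l with
    | nil => simp [PySem.Chars.replace.go, pvRep]
    | cons c t =>
      rw [PySem.Chars.replace.go]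
      by_cases hp : old.isPrefixOf (c :: t)
      · obtain ⟨m, hm⟩ : ∃ m, old.length = m + 1 := by
          cases old with
          | nil => exact absurd rfl hold
          | cons a b => exact ⟨b.length, by simp⟩
        have hdrop : List.drop old.length (c :: t) = t.drop (old.length - 1) := by
          rw [hm]; simp
        rw [hp]
        simp only [if_true]
        rw [hdrop, ih _ _ (by simp at hl ⊢; omega)]
        rw [pvRep]
        simp [hp]
      · rw [if_neg (by simp [hp])]
        rw [ih _ _ (by simp at hl ⊢; omega)]
        rw [pvRep]
        simp [hp]

theorem pvReplace_eq (old new l : List Char) (hold : old ≠ []) :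
    PySem.Chars.replace l old new = pvRep old new l := by
  unfold PySem.Chars.replace
  rw [if_neg (by simp [List.isEmpty_iff, hold])]
  rw [pvReplace_go_eq old new hold l.length l [] le_rfl]
  simp

theorem pvSplit_go_eq (sep : List Char) (hsep : sep ≠ []) :
    ∀ (fuel : Nat) (l cur : List Char) (acc : List (List Char)), l.length ≤ fuel →
      PySem.Chars.splitOn.go sep fuel l cur acc =
        acc.reverse ++
          (match pvSpl sep l with
           | [] => [cur.reverse]
           | p :: ps => (cur.reverse ++ p) :: ps) := by
  intro fuel
  induction fuel with
  | zero =>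
    intro l cur acc hl
    have : l = [] := by cases l <;> simp_all
    subst this
    simp [PySem.Chars.splitOn.go, pvSpl]
  | succ n ih =>
    intro l cur acc hl
    cases l with
    | nil => simp [PySem.Chars.splitOn.go, pvSpl]
    | cons c t =>
      rw [PySem.Chars.splitOn.go]
      by_cases hp : sep.isPrefixOf (c :: t)
      · obtain ⟨m, hm⟩ : ∃ m, sep.length = m + 1 := by
          cases sep with
          | nil => exact absurd rfl hsep
          | cons a b => exact ⟨b.length, by simp⟩
        have hdrop : List.drop sep.length (c :: t) = t.drop (sep.length - 1) := by
          rw [hm]; simp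
        rw [hp]
        simp only [if_true]
        rw [hdrop, ih _ _ _ (by simp at hl ⊢; omega)]
        rw [pvSpl]
        simp only [hp, if_true]
        rcases h : pvSpl sep (t.drop (sep.length - 1)) with _ | ⟨p, ps⟩
        · exact absurd h (pvSpl_ne_nil _ _)
        · simp
      · rw [if_neg (by simp [hp])]
        rw [ih _ _ _ (by simp at hl ⊢; omega)]
        rw [pvSpl]
        simp only [hp, if_false, Bool.false_eq_true]
        rcases h : pvSpl sep t with _ | ⟨p, ps⟩
        · exact absurd h (pvSpl_ne_nil _ _)
        · simp

theorem pvSplitOn_eq (sep l : List Char) (hsep : sep ≠ []) :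
    PySem.Chars.splitOn l sep = pvSpl sep l := by
  unfold PySem.Chars.splitOn
  rw [pvSplit_go_eq sep hsep (l.length + 1) l [] [] (by omega)]
  rcases h : pvSpl sep l with _ | ⟨p, ps⟩
  · exact absurd h (pvSpl_ne_nil _ _)
  · simp

theorem pvJoin_spl (old new : List Char) (_hold : old ≠ []) :
    ∀ (n : Nat) (l : List Char), l.length ≤ n →
      new.intercalate (pvSpl old l) = pvRep old new l := by
  intro n
  induction n with
  | zero =>
    intro l hl
    have : l = [] := by cases l <;> simp_all
    subst this
    simp [pvSpl, pvRep, List.intercalate]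
  | succ n ih =>
    intro l hl
    cases l with
    | nil => simp [pvSpl, pvRep, List.intercalate]
    | cons c t =>
      rw [pvSpl, pvRep]
      by_cases hp : old.isPrefixOf (c :: t)
      · simp only [hp, if_true]
        rcases h : pvSpl old (t.drop (old.length - 1)) with _ | ⟨p, ps⟩
        · exact absurd h (pvSpl_ne_nil _ _)
        · have hrec := ih (t.drop (old.length - 1))
            (by simp at hl ⊢; omega)
          rw [h] at hrec
          rw [← hrec]
          simp [List.intercalate]
      · simp only [hp, if_false, Bool.false_eq_true]
        have hrec := ih t (by simp at hl ⊢; omega)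
        rcases h : pvSpl old t with _ | ⟨p, ps⟩
        · exact absurd h (pvSpl_ne_nil _ _)
        · rw [h] at hrec
          rw [← hrec]
          cases ps <;> simp [List.intercalate]

-- ONE pass of B equals ONE pass of A:  new.join(s.split(old)) = s.replace(old, new)  (old ≠ "").
theorem pvJoinSplit_eq_replace (s old new : String) (hold : old.toList ≠ []) :
    PySem.Str.join new ((PySem.Str.split? s old).getD []) = PySem.Str.replace s old new := by
  unfold PySem.Str.split? PySem.Str.join PySem.Str.replace PySem.Chars.split?
  rw [if_neg (by simp [List.isEmpty_iff, hold])]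
  simp only [Option.map_some, Option.getD_some, List.map_map]
  have hmap : (List.map (String.toList ∘ String.ofList) (PySem.Chars.splitOn s.toList old.toList))
      = PySem.Chars.splitOn s.toList old.toList := by
    simp [Function.comp_def]
  rw [hmap]
  unfold PySem.Chars.join
  rw [pvSplitOn_eq _ _ hold, pvReplace_eq _ _ _ hold,
    pvJoin_spl old.toList new.toList hold s.toList.length s.toList le_rfl]

-- ===== VERDICT (by name: the statement is the Claim_ definition above) =====
theorem convert_python_ast_to_ltl_spec : Claim_equal_convert_python_ast_to_ltl := by
  intro s _
  unfold Spec_convert_python_ast_to_ltl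
  have hA : convert_python_ast_to_ltl s =
      PySem.Str.strip
        (PySem.Str.replace (PySem.Str.replace (PySem.Str.replace (PySem.Str.replace
          (PySem.Str.replace (PySem.Str.replace (PySem.Str.replace s
            "Always(" "G(") "Eventually(" "F(") "Next(" "X(") "Until(" "U(")
            "And(" "(") "Or(" "(") "Not(" "!(") := rfl
  have hB : convert_python_ast_to_ltl_alt s =
      PySem.Str.strip
        (PySem.Str.join "!(" ((PySem.Str.split? (PySem.Str.join "(" ((PySem.Str.split?
          (PySem.Str.join "(" ((PySem.Str.split? (PySem.Str.join "U(" ((PySem.Str.split?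
          (PySem.Str.join "X(" ((PySem.Str.split? (PySem.Str.join "F(" ((PySem.Str.split?
          (PySem.Str.join "G(" ((PySem.Str.split? s "Always(").getD []))
            "Eventually(").getD [])) "Next(").getD [])) "Until(").getD []))
            "And(").getD [])) "Or(").getD [])) "Not(").getD [])) := rfl
  rw [hA, hB]
  rw [pvJoinSplit_eq_replace _ _ _ (by decide), pvJoinSplit_eq_replace _ _ _ (by decide),
    pvJoinSplit_eq_replace _ _ _ (by decide), pvJoinSplit_eq_replace _ _ _ (by decide),
    pvJoinSplit_eq_replace _ _ _ (by decide), pvJoinSplit_eq_replace _ _ _ (by decide),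
    pvJoinSplit_eq_replace _ _ _ (by decide)]
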